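-- pv_equiv track=rewrite | github.com/sallychenyq/audio_adversarial | TUAP/TUAPcopy.py | dealPhoneList
-- ===== SOURCE A (Python) =====
-- def dealPhoneList(phonList):
--     phonList = phonList.split(" ")
--     ans = []
--     for index,item in enumerate(phonList):
--         ans = ans + item.split('-')
--         if(index < len(phonList) - 1): ans.append(' ')
--     ans = [x for x in ans if x != '']
--     return ans
-- ===== SOURCE B (Python) =====
-- def dealPhoneList(phonList):
--     ans = []
--     cur = ""
--     for ch in phonList:
--         if ch == '-':
--             if cur != "":
--                 ans.append(cur)
--             cur = ""
--         elif ch == ' ':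
--             if cur != "":
--                 ans.append(cur)
--             cur = ""
--             ans.append(' ')
--         else:
--             cur = cur + ch
--     if cur != "":
--         ans.append(cur)
--     return ans
-- ===== Notes on version B (the rewrite author's own statement) =====
-- stated objective: alternative
-- what changed: B replaces A's split-on-spaces / per-token split-on-dashes / interleave / final-filter pipeline with a single left-to-right character scan that maintains a running token, flushing it at dash and space boundaries; it builds no intermediate token lists.
import Mathlib
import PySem

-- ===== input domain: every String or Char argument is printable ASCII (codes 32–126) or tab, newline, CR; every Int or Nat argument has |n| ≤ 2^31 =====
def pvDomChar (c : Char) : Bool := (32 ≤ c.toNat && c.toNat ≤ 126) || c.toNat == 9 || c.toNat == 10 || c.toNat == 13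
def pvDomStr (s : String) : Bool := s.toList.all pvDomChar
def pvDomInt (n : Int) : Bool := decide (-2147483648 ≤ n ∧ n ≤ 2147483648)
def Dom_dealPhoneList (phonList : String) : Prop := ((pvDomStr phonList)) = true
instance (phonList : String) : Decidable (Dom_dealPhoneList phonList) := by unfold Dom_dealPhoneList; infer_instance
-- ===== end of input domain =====

-- B replaces A's split-on-spaces / split-each-token-on-dashes / interleave / filter pipeline by a single
-- left-to-right character scan with a running token flushed at dash and space boundaries (same return value).

-- ===== PORT A =====
def dealPhoneList (phonList : String) : List String :=
  let parts : List String := (PySem.Str.split? phonList " ").getD []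
  let ans : List String :=
    (PySem.List.enumerate parts 0).foldl
      (fun ans p =>
        let a := ans ++ (PySem.Str.split? p.2 "-").getD []
        if p.1 < (parts.length : Int) - 1 then a ++ [" "] else a) []
  ans.filter (fun x => x ≠ "")

-- ===== PORT B =====
-- one step of B's character loop: state = (ans, cur)
def pvAltStep (st : List String × String) (ch : Char) : List String × String :=
  if ch = '-' then ((if st.2 ≠ "" then st.1 ++ [st.2] else st.1), "")
  else if ch = ' ' then ((if st.2 ≠ "" then st.1 ++ [st.2] else st.1) ++ [" "], "")
  else (st.1, st.2.push ch)

def dealPhoneList_alt (phonList : String) : List String :=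
  let st := phonList.toList.foldl pvAltStep ([], "")
  if st.2 ≠ "" then st.1 ++ [st.2] else st.1

-- ===== PRECONDITION & SPEC =====
def Spec_dealPhoneList (phonList : String) (out : List String) : Prop := out = dealPhoneList_alt phonList
instance (phonList : String) (out : List String) : Decidable (Spec_dealPhoneList phonList out) := by unfold Spec_dealPhoneList; infer_instance

-- ===== CLAIM (what is proved, stated in full; the proofs are below) =====
def Claim_equal_dealPhoneList : Prop := ∀ (phonList : String), Dom_dealPhoneList phonList → Spec_dealPhoneList phonList (dealPhoneList phonList)

-- ===== LEMMAS AND PROOFS =====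
def pvSgo (d : Char) (cur : List Char) : List Char → List (List Char)
  | [] => [cur]
  | a :: l => if a = d then cur :: pvSgo d [] l else pvSgo d (cur ++ [a]) l
theorem pvSgo_ne_nil (d : Char) (cur l : List Char) : pvSgo d cur l ≠ [] := by
  induction l generalizing cur with
  | nil => simp [pvSgo]
  | cons a l ih => by_cases h : a = d <;> simp [pvSgo, h, ih]
def pvUpdLast (a : Char) : List (List Char) → List (List Char)
  | [] => []
  | [x] => [x ++ [a]]
  | x :: y :: xs => x :: pvUpdLast a (y :: xs)
theorem pvUpdLast_append (a : Char) (xs : List (List Char)) (x : List Char) :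
    pvUpdLast a (xs ++ [x]) = xs ++ [x ++ [a]] := by
  induction xs with
  | nil => simp [pvUpdLast]
  | cons y ys ih =>
    cases ys with
    | nil => simp [pvUpdLast]
    | cons z zs => simpa [pvUpdLast] using ih

theorem pvUpdLast_cons (a : Char) (x : List Char) (xs : List (List Char)) (h : xs ≠ []) :
    pvUpdLast a (x :: xs) = x :: pvUpdLast a xs := by
  cases xs with
  | nil => exact absurd rfl h
  | cons y ys => rfl

theorem pvSgo_append (d : Char) (l : List Char) : ∀ (cur : List Char) (a : Char),
    pvSgo d cur (l ++ [a]) =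
      if a = d then pvSgo d cur l ++ [[]] else pvUpdLast a (pvSgo d cur l) := by
  induction l with
  | nil =>
    intro cur a
    by_cases h : a = d <;> simp [pvSgo, h, pvUpdLast]
  | cons c cs ih =>
    intro cur a
    by_cases hc : c = d
    · by_cases h : a = d <;>
        simp [pvSgo, hc, h, ih, pvUpdLast_cons _ _ _ (pvSgo_ne_nil d [] cs)]
    · by_cases h : a = d <;> simp [pvSgo, hc, h, ih]

def pvDashF (p : List Char) : List String :=
  ((pvSgo '-' [] p).filter (fun x => x ≠ [])).map String.ofList
def pvJoinA : List (List Char) → List String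
  | [] => []
  | [p] => pvDashF p
  | p :: q :: ps => pvDashF p ++ " " :: pvJoinA (q :: ps)
def pvAspec (w : List Char) : List Char → List String
  | [] => pvDashF w
  | c :: cs => if c = ' ' then pvDashF w ++ " " :: pvAspec [] cs else pvAspec (w ++ [c]) cs
def pvCspec (front : List (List Char)) (back : List Char) : List Char → List String
  | [] => ((front ++ [back]).filter (fun x => x ≠ [])).map String.ofList
  | c :: cs =>
    if c = ' ' then
      ((front ++ [back]).filter (fun x => x ≠ [])).map String.ofList ++ " " :: pvCspec [] [] cs
    else if c = '-' then pvCspec (front ++ [back]) [] cs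
    else pvCspec front (back ++ [c]) cs
def pvBspec (cur : List Char) : List Char → List String
  | [] => if cur = [] then [] else [String.ofList cur]
  | c :: cs =>
    if c = '-' then (if cur = [] then [] else [String.ofList cur]) ++ pvBspec [] cs
    else if c = ' ' then (if cur = [] then [] else [String.ofList cur]) ++ " " :: pvBspec [] cs
    else pvBspec (cur ++ [c]) cs

theorem pvK (cs : List Char) : ∀ w, pvJoinA (pvSgo ' ' w cs) = pvAspec w cs := by
  induction cs with
  | nil => intro w; simp [pvSgo, pvJoinA, pvAspec]
  | cons c cs ih =>
    intro w
    by_cases hc : c = ' '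
    · subst hc
      have hne := pvSgo_ne_nil ' ' [] cs
      cases hrest : pvSgo ' ' [] cs with
      | nil => exact absurd hrest hne
      | cons q ps =>
        simp only [pvSgo, pvAspec, if_true, hrest]
        rw [pvJoinA, ← hrest, ih]
    · simp [pvSgo, hc, pvAspec, ih]

theorem pvM1 (cs : List Char) : ∀ front back w, pvSgo '-' [] w = front ++ [back] →
    pvAspec w cs = pvCspec front back cs := by
  induction cs with
  | nil => intro front back w h; simp [pvAspec, pvCspec, pvDashF, h]
  | cons c cs ih =>
    intro front back w h
    by_cases hsp : c = ' '
    · subst hsp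
      rw [pvAspec, if_pos rfl, pvCspec, if_pos rfl, pvDashF, h]
      rw [ih [] [] [] (by simp [pvSgo])]
    · by_cases hd : c = '-'
      · subst hd
        rw [pvAspec, if_neg (by simp), pvCspec, if_neg (by simp), if_pos rfl]
        refine ih (front ++ [back]) [] (w ++ ['-']) ?_
        rw [pvSgo_append, if_pos rfl, h]
      · rw [pvAspec, if_neg hsp, pvCspec, if_neg hsp, if_neg hd]
        refine ih front (back ++ [c]) (w ++ [c]) ?_
        rw [pvSgo_append, if_neg hd, h, pvUpdLast_append]

theorem pvM2 (cs : List Char) : ∀ front back,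
    pvCspec front back cs =
      ((front.filter (fun x => x ≠ [])).map String.ofList) ++ pvBspec back cs := by
  induction cs with
  | nil =>
    intro front back
    by_cases hb : back = [] <;> simp [pvCspec, pvBspec, hb, List.filter_append]
  | cons c cs ih =>
    intro front back
    by_cases hsp : c = ' '
    · subst hsp
      rw [pvCspec, if_pos rfl, pvBspec, if_neg (by simp), if_pos rfl, ih]
      by_cases hb : back = [] <;> simp [hb, List.filter_append]
    · by_cases hd : c = '-'
      · subst hd
        rw [pvCspec, if_neg (by simp), if_pos rfl, pvBspec, if_pos rfl, ih]
        by_cases hb : back = [] <;> simp [hb, List.filter_append]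
      · rw [pvCspec, if_neg hsp, if_neg hd, pvBspec, if_neg hd, if_neg hsp, ih]


theorem pvToList_ne_nil (t : String) (h : t ≠ "") : t.toList ≠ [] := by
  intro hh
  exact h (by simpa using congrArg String.ofList hh)

theorem pvL (cs : List Char) : ∀ ans (cur : String),
    (let st := cs.foldl pvAltStep (ans, cur);
     if st.2 ≠ "" then st.1 ++ [st.2] else st.1) = ans ++ pvBspec cur.toList cs := by
  induction cs with
  | nil =>
    intro ans cur
    by_cases h : cur = ""
    · simp [pvBspec, h]
    · simp [pvBspec, h, pvToList_ne_nil cur h]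
  | cons c cs ih =>
    intro ans cur
    by_cases hd : c = '-'
    · subst hd
      simp only [List.foldl_cons, pvAltStep, reduceIte]
      rw [ih]
      by_cases h : cur = ""
      · simp [pvBspec, h]
      · simp [pvBspec, h, pvToList_ne_nil cur h]
    · by_cases hs : c = ' '
      · subst hs
        simp only [List.foldl_cons, pvAltStep, reduceIte]
        rw [ih]
        by_cases h : cur = ""
        · simp [pvBspec, h]
        · simp [pvBspec, h, pvToList_ne_nil cur h]
      · simp only [List.foldl_cons, pvAltStep, if_neg hd, if_neg hs]
        rw [ih]
        simp [pvBspec, hd, hs]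

theorem pvGo_eq_sgo (d : Char) (fuel : Nat) : ∀ (l cur : List Char) (ls : List (List Char)),
    l.length ≤ fuel →
    PySem.Chars.splitOn.go [d] fuel l cur ls = ls.reverse ++ pvSgo d cur.reverse l := by
  induction fuel with
  | zero =>
    intro l cur ls h
    have : l = [] := by cases l <;> simp_all
    subst this
    simp [PySem.Chars.splitOn.go, pvSgo]
  | succ n ih =>
    intro l cur ls h
    cases l with
    | nil => simp [PySem.Chars.splitOn.go, pvSgo]
    | cons c rest =>
      by_cases hc : d = c
      · subst hc
        simp only [PySem.Chars.splitOn.go, List.isPrefixOf, BEq.rfl, Bool.true_and,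
          if_true, List.length_cons, List.drop_succ_cons, List.length_nil, List.drop_zero]
        rw [ih rest [] (cur.reverse :: ls) (by simpa using Nat.le_of_succ_le_succ h)]
        simp [pvSgo]
      · have hbeq : (d == c) = false := by simp [hc]
        simp only [PySem.Chars.splitOn.go, List.isPrefixOf, hbeq, Bool.false_and,
          Bool.false_eq_true, if_false]
        rw [ih rest (c :: cur) ls (by simpa using Nat.le_of_succ_le_succ h)]
        simp [pvSgo, Ne.symm hc]

theorem pvSplitOn_eq_sgo (d : Char) (l : List Char) :
    PySem.Chars.splitOn l [d] = pvSgo d [] l := by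
  have := pvGo_eq_sgo d (l.length + 1) l [] [] (by omega)
  simpa [PySem.Chars.splitOn] using this


theorem pvFoldA (f : String → List String) (n : Int) (l : List (Int × String)) : ∀ acc,
    l.foldl (fun ans p =>
      if p.1 < n then ans ++ f p.2 ++ [" "] else ans ++ f p.2) acc
    = acc ++ l.flatMap (fun p => f p.2 ++ if p.1 < n then [" "] else []) := by
  induction l with
  | nil => intro acc; simp
  | cons p l ih =>
    intro acc
    simp only [List.foldl_cons, List.flatMap_cons]
    rw [ih]
    by_cases h : p.1 < n <;> simp [h]

theorem pvInner (q : List Char) :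
    List.filter (fun x => x ≠ "") ((PySem.Str.split? (String.ofList q) "-").getD []) = pvDashF q := by
  have h1 : PySem.Str.split? (String.ofList q) "-" = some ((pvSgo '-' [] q).map String.ofList) := by
    simp [PySem.Str.split?, PySem.Chars.split?, show "-".toList = ['-'] from rfl,
      pvSplitOn_eq_sgo]
  rw [h1]
  simp only [Option.getD_some, List.filter_map, pvDashF]
  congr 1
  apply List.filter_congr
  intro x _
  simp

theorem pvE (P : List (List Char)) : ∀ (k : Nat) (n : Int), n = (k : Int) + P.length - 1 →
    (PySem.List.enumerate (P.map String.ofList) (k : Int)).flatMap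
      (fun p => List.filter (fun x => x ≠ "") ((PySem.Str.split? p.2 "-").getD [])
                ++ if p.1 < n then [" "] else [])
    = pvJoinA P := by
  induction P with
  | nil => intro k n h; simp [pvJoinA]
  | cons q P ih =>
    intro k n h
    simp only [List.map_cons, PySem.List.enumerate_cons, List.flatMap_cons, pvInner]
    cases P with
    | nil =>
      have hn : ¬ ((k : Int) < n) := by
        simp only [List.length_cons, List.length_nil] at h; push_cast at h; omega
      simp [hn, pvJoinA]
    | cons q' P' =>
      have hn : (k : Int) < n := by
        simp only [List.length_cons] at h; push_cast at h; omega
      have hrec := ih (k + 1) n (by simp only [List.length_cons] at h ⊢; push_cast at h ⊢; omega)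
      push_cast at hrec
      rw [pvJoinA, ← hrec]
      simp [hn]

theorem pvA_eq_joinA (s : String) :
    dealPhoneList s = pvJoinA (pvSgo ' ' [] s.toList) := by
  have hsplit : (PySem.Str.split? s " ").getD []
      = (pvSgo ' ' [] s.toList).map String.ofList := by
    simp [PySem.Str.split?, PySem.Chars.split?, show " ".toList = [' '] from rfl,
      pvSplitOn_eq_sgo]
  unfold dealPhoneList
  simp only [hsplit]
  rw [pvFoldA (fun t => (PySem.Str.split? t "-").getD []) ((((pvSgo ' ' [] s.toList).map String.ofList).length : Int) - 1)]
  simp only [List.nil_append, List.filter_flatMap, List.filter_append]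
  have hite : ∀ (c : Prop) (inst : Decidable c),
      List.filter (fun x => x ≠ "") (if c then ([" "] : List String) else []) =
        if c then [" "] else [] := by
    intro c inst; split_ifs <;> simp
  simp only [hite, List.length_map]
  have := pvE (pvSgo ' ' [] s.toList) 0 (((pvSgo ' ' [] s.toList).length : Int) - 1)
    (by push_cast; ring)
  simpa using this

-- ===== VERDICT (by name: the statement is the Claim_ definition above) =====
theorem dealPhoneList_spec : Claim_equal_dealPhoneList := by
  intro s _
  unfold Spec_dealPhoneList
  have hA := pvA_eq_joinA s
  have hK := pvK s.toList []
  have hM1 := pvM1 s.toList [] [] [] (by simp [pvSgo])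
  have hM2 := pvM2 s.toList [] []
  have hL := pvL s.toList [] ""
  simp only [List.filter_nil, List.map_nil, List.nil_append] at hM2
  rw [hA, hK, hM1, hM2]
  simpa [dealPhoneList_alt] using hL.symm
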